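-- pv_equiv track=rewrite | github.com/adrien-dimitri/kwl-variant | colour_update.py | get_new_colors
-- ===== SOURCE A (Python) =====
-- def get_new_colors(raw_signatures):
--     """Maps raw signatures to canonical new color integers."""
--     signature_tuples = [tuple(s) for s in raw_signatures]
--
--     signature_to_new_color = {}
--     new_color_counter = 1
--     new_color_list = []
--
--     for signature in signature_tuples:
--         if signature not in signature_to_new_color:
--             signature_to_new_color[signature] = new_color_counter
--             new_color_counter += 1
--
--         new_color_list.append(signature_to_new_color[signature])
--
--     num_unique_colors = new_color_counter - 1
--
--     return new_color_list, signature_to_new_color, num_unique_colors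
-- ===== SOURCE B (Python) =====
-- def get_new_colors(raw_signatures):
--     """Maps raw signatures to canonical new color integers."""
--     signature_tuples = [tuple(s) for s in raw_signatures]
--     # positions whose signature has not appeared earlier, in increasing order
--     firsts = [i for i, t in enumerate(signature_tuples) if t not in signature_tuples[:i]]
--     # a signature's color = rank of its first-occurrence position among all first positions
--     new_color_list = [firsts.index(signature_tuples.index(t)) + 1
--                       for t in signature_tuples]
--     signature_to_new_color = {signature_tuples[i]: k + 1 for k, i in enumerate(firsts)}
--     return new_color_list, signature_to_new_color, len(firsts)
-- ===== Notes on version B (the rewrite author's own statement) =====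
-- stated objective: alternative
-- what changed: A fuses labelling with incremental hash-table construction and a running counter; B uses no mapping structure while labelling: it collects the first-occurrence positions by positional scans (enumerate + prefix membership), assigns each signature the rank of its first index via list.index over that position list, and builds the dict only at the end as output.
import Mathlib
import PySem

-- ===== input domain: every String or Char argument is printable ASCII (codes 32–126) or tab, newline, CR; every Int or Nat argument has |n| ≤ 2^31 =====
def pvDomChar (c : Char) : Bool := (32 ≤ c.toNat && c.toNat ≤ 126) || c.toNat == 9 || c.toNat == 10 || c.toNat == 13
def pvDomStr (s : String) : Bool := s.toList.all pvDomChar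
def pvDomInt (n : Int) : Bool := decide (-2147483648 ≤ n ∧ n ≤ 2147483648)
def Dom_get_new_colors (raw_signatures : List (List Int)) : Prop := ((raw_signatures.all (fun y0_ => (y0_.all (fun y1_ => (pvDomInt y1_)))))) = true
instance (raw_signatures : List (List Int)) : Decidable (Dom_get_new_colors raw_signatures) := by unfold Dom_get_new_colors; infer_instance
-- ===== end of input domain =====

-- B replaces A's fused hash-table-with-counter loop by positional scans: it lists the
-- first-occurrence positions, ranks each signature's first index in that list via list.index,
-- and builds the dict only at the end as output. Alternative decomposition, same results.

-- ===== PORT A =====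
-- A's loop body: maybe insert the signature with the next counter value, then append its (now present) color.
def pvStepA (st : PySem.Dict (List Int) Int × Int × List Int) (signature : List Int) :
    PySem.Dict (List Int) Int × Int × List Int :=
  let d := st.1
  let c := st.2.1
  let acc := st.2.2
  let (d', c') := if d.contains signature then (d, c) else (d.insert signature c, c + 1)
  -- signature_to_new_color[signature]: the key is always present here, so getD is exact (no KeyError possible)
  (d', c', acc ++ [d'.getD signature 0])

def get_new_colors (raw_signatures : List (List Int)) : List Int × (List (List Int × Int)) × Int :=
  -- tuple(s) is the identity under the type convention (keys are List Int)
  let signature_tuples := raw_signatures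
  let st := signature_tuples.foldl pvStepA (PySem.Dict.empty, 1, [])
  (st.2.2, st.1.items, st.2.1 - 1)

-- ===== PORT B =====
-- [i for i, t in enumerate(signature_tuples) if t not in signature_tuples[:i]]
def pvFirsts (signature_tuples : List (List Int)) : List Int :=
  ((PySem.List.enumerate signature_tuples 0).filter
    (fun q => !(PySem.List.slice signature_tuples none (some q.1)).contains q.2)).map (·.1)

def get_new_colors_alt (raw_signatures : List (List Int)) : List Int × (List (List Int × Int)) × Int :=
  let signature_tuples := raw_signatures
  let firsts := pvFirsts signature_tuples
  -- both list.index calls always succeed (t is in the list; its first index is in firsts), so getD 0 is exact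
  let new_color_list := signature_tuples.map (fun t =>
    (((PySem.List.index? firsts (((PySem.List.index? signature_tuples t).getD 0 : Nat) : Int)).getD 0 : Nat) : Int) + 1)
  let signature_to_new_color := (PySem.List.enumerate firsts 0).foldl
    (fun d q => d.insert (PySem.List.pyGetD signature_tuples q.2 []) (q.1 + 1)) PySem.Dict.empty
  (new_color_list, signature_to_new_color.items, (firsts.length : Int))

-- ===== PRECONDITION & SPEC =====
def Spec_get_new_colors (raw_signatures : List (List Int)) (out : List Int × (List (List Int × Int)) × Int) : Prop := out = get_new_colors_alt raw_signatures
instance (raw_signatures : List (List Int)) (out : List Int × (List (List Int × Int)) × Int) : Decidable (Spec_get_new_colors raw_signatures out) := by unfold Spec_get_new_colors; infer_instance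

-- ===== CLAIM (what is proved, stated in full; the proofs are below) =====
def Claim_equal_get_new_colors : Prop := ∀ (raw_signatures : List (List Int)), Dom_get_new_colors raw_signatures → Spec_get_new_colors raw_signatures (get_new_colors raw_signatures)

-- ===== LEMMAS AND PROOFS =====

-- Canonical table both sides agree with: dedup-in-order, key s ↦ rank+1
def pvTableB (signatures : List (List Int)) : PySem.Dict (List Int) Int :=
  (PySem.List.enumerate (PySem.List.dedup signatures) 0).foldl
    (fun d p => d.insert p.2 (p.1 + 1)) PySem.Dict.empty

-- B's state after having processed the prefix p of the input (A-side invariant)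
def pvState (p : List (List Int)) : PySem.Dict (List Int) Int × Int × List Int :=
  (pvTableB p, ((PySem.List.dedup p).length : Int) + 1,
   p.map (fun s => (pvTableB p).getD s 0))

theorem pvDedup_append (p : List (List Int)) (s : List Int) :
    PySem.List.dedup (p ++ [s]) =
      if s ∈ p then PySem.List.dedup p else PySem.List.dedup p ++ [s] := by
  simp [PySem.List.dedup_eq_ofList, PySem.Set.ofList_append_singleton, PySem.Set.add,
    PySem.Set.contains, PySem.Set.mem_ofList]

theorem pvKeys_tableB (p : List (List Int)) : (pvTableB p).keys = PySem.List.dedup p := by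
  unfold pvTableB
  rw [PySem.Dict.keys_foldl_insert_key (key := fun q : Int × List Int => q.2)
      (f := fun _ q => q.1 + 1)]
  simp [PySem.List.map_snd_enumerate, PySem.Set.update_nil_left,
    PySem.List.dedup_eq_ofList, PySem.Set.ofList_ofList]

theorem pvContains_tableB (p : List (List Int)) (s : List Int) :
    (pvTableB p).contains s = decide (s ∈ p) := by
  rw [PySem.Dict.contains_eq_decide_mem_keys, pvKeys_tableB]
  simp

theorem pvTableB_append_new (p : List (List Int)) (s : List Int) (h : s ∉ p) :
    pvTableB (p ++ [s]) =
      (pvTableB p).insert s (((PySem.List.dedup p).length : Int) + 1) := by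
  unfold pvTableB
  rw [pvDedup_append, if_neg h, PySem.List.enumerate_append, List.foldl_append]
  simp [PySem.List.enumerate]

theorem pvStep_state (p : List (List Int)) (s : List Int) :
    pvStepA (pvState p) s = pvState (p ++ [s]) := by
  by_cases h : s ∈ p
  · have hc : (pvTableB p).contains s = true := by rw [pvContains_tableB]; simpa
    have hd : PySem.List.dedup (p ++ [s]) = PySem.List.dedup p := by
      rw [pvDedup_append, if_pos h]
    have ht : pvTableB (p ++ [s]) = pvTableB p := by unfold pvTableB; rw [hd]
    simp only [pvStepA, pvState, hc, if_true, ht, hd, List.map_append, List.map_cons,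
      List.map_nil]
  · have hc : (pvTableB p).contains s = false := by rw [pvContains_tableB]; simpa
    have hd : PySem.List.dedup (p ++ [s]) = PySem.List.dedup p ++ [s] := by
      rw [pvDedup_append, if_neg h]
    have ht := pvTableB_append_new p s h
    simp only [pvStepA, pvState, hc, Bool.false_eq_true, if_false, ht, hd,
      List.length_append, List.map_append, List.map_cons, List.map_nil, Prod.mk.injEq]
    refine ⟨trivial, by simp, ?_⟩
    congr 1
    apply List.map_congr_left
    intro x hx
    rw [PySem.Dict.getD_insert, if_neg (by rintro rfl; exact h hx)]

theorem pvLoopA (rest p : List (List Int)) :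
    rest.foldl pvStepA (pvState p) = pvState (p ++ rest) := by
  induction rest generalizing p with
  | nil => simp
  | cons s rest ih =>
      rw [List.foldl_cons, pvStep_state, ih]
      simp

theorem pvState_nil : pvState [] = (PySem.Dict.empty, 1, []) := by
  simp [pvState, pvTableB, PySem.List.dedup_eq_ofList, PySem.Set.ofList_nil]

-- the canonical table's items list
theorem pvItems_tableB (p : List (List Int)) :
    (pvTableB p).items =
      (PySem.List.enumerate (PySem.List.dedup p) 0).map (fun q => (q.2, q.1 + 1)) := by
  unfold pvTableB
  have h := PySem.Dict.items_foldl_insert_fresh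
      (PySem.List.enumerate (PySem.List.dedup p) 0) (fun q => q.2) (fun q => q.1 + 1)
      PySem.Dict.empty (by intro a _; simp)
      (by rw [PySem.List.map_snd_enumerate]; exact PySem.List.nodup_dedup p)
  simpa using h

theorem pvNodupKeys_tableB (p : List (List Int)) : (pvTableB p).keys.Nodup := by
  rw [pvKeys_tableB]; exact PySem.List.nodup_dedup p

-- the canonical table's lookups are ranks in the dedup list
theorem pvGetD_tableB (p : List (List Int)) (t : List Int) (ht : t ∈ p) :
    (pvTableB p).getD t 0 =
      (((PySem.List.index? (PySem.List.dedup p) t).getD 0 : Nat) : Int) + 1 := by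
  have htd : t ∈ PySem.List.dedup p := (PySem.List.mem_dedup _ _).2 ht
  obtain ⟨k, hk⟩ := Option.isSome_iff_exists.1 ((PySem.List.index?_isSome_iff _ _).2 htd)
  obtain ⟨hklt, hget, -⟩ := PySem.List.getElem_of_index?_eq_some hk
  have hmem : (t, ((k : Int)) + 1) ∈ (pvTableB p).items := by
    rw [pvItems_tableB]
    refine List.mem_map.2 ⟨((0 : Int) + k, (PySem.List.dedup p)[k]),
      (PySem.List.mem_enumerate_iff _ _ _).2 ⟨k, hklt, rfl⟩, ?_⟩
    simp only [hget]
    simp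
  rw [PySem.Dict.getD_of_mem_items _ hmem (pvNodupKeys_tableB p) 0, hk]
  simp

-- enumerate of a mapped list
theorem pvEnumerate_map {α β : Type} (g : α → β) (l : List α) (s : Int) :
    PySem.List.enumerate (l.map g) s =
      (PySem.List.enumerate l s).map (fun q => (q.1, g q.2)) := by
  induction l generalizing s with
  | nil => simp [PySem.List.enumerate_nil]
  | cons x xs ih => simp [PySem.List.enumerate_cons, ih]

-- list.index through a map that is injective on the list
theorem pvIndex?_map_inj {α β : Type} [BEq α] [LawfulBEq α] [BEq β] [LawfulBEq β]
    (g : α → β) (l : List α) (x : α) (hx : x ∈ l)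
    (hinj : ∀ a ∈ l, ∀ b ∈ l, g a = g b → a = b) :
    PySem.List.index? (l.map g) (g x) = PySem.List.index? l x := by
  induction l with
  | nil => simp at hx
  | cons y ys ih =>
      by_cases hxy : y = x
      · subst hxy
        rw [List.map_cons, PySem.List.index?_cons_self, PySem.List.index?_cons_self]
      · have hx' : x ∈ ys := by
          rcases List.mem_cons.1 hx with h | h
          · exact absurd h.symm hxy
          · exact h
        have hgy : g y ≠ g x := fun h =>
          hxy (hinj y (List.mem_cons_self) x hx h)
        rw [List.map_cons, PySem.List.index?_cons_of_ne _ hgy,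
          PySem.List.index?_cons_of_ne _ hxy,
          ih hx' (fun a ha b hb => hinj a (List.mem_cons_of_mem _ ha) b (List.mem_cons_of_mem _ hb))]

-- B's first-occurrence position list, appending one element
theorem pvFirsts_append (p : List (List Int)) (s : List Int) :
    pvFirsts (p ++ [s]) =
      pvFirsts p ++ (if s ∈ p then [] else [(p.length : Int)]) := by
  unfold pvFirsts
  rw [PySem.List.enumerate_append, List.filter_append, List.map_append]
  congr 1
  · apply congrArg
    apply List.filter_congr
    intro q hq
    obtain ⟨k, hklt, rfl⟩ := (PySem.List.mem_enumerate_iff _ _ _).1 hq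
    have h1 : ((0 : Int) + k) = ((k : Nat) : Int) := by simp
    rw [h1, PySem.List.slice_to_natCast, PySem.List.slice_to_natCast,
      List.take_append_of_le_length (le_of_lt hklt)]
  · have h1 : PySem.List.enumerate [s] (0 + (p.length : Int)) = [((p.length : Int), s)] := by
      simp [PySem.List.enumerate_cons, PySem.List.enumerate_nil]
    rw [h1]
    have h2 : PySem.List.slice (p ++ [s]) none (some ((p.length : Int))) = p := by
      rw [PySem.List.slice_to_natCast]
      simp
    by_cases h : s ∈ p
    · simp [List.filter, h2, h]
    · simp [List.filter, h2, h]

-- B's firsts = first indices of the dedup list, in order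
theorem pvFirsts_eq (p : List (List Int)) :
    pvFirsts p =
      (PySem.List.dedup p).map (fun s => (((PySem.List.index? p s).getD 0 : Nat) : Int)) := by
  induction p using List.reverseRecOn with
  | nil =>
      simp [pvFirsts, PySem.List.enumerate_nil, PySem.List.dedup_eq_ofList,
        PySem.Set.ofList_nil]
  | append_singleton p s ih =>
      rw [pvFirsts_append, ih, pvDedup_append]
      by_cases h : s ∈ p
      · rw [if_pos h, if_pos h, List.append_nil]
        apply List.map_congr_left
        intro x hx
        rw [PySem.List.index?_append_of_mem _ ((PySem.List.mem_dedup _ _).1 hx)]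
      · rw [if_neg h, if_neg h, List.map_append]
        congr 1
        · apply List.map_congr_left
          intro x hx
          rw [PySem.List.index?_append_of_mem _ ((PySem.List.mem_dedup _ _).1 hx)]
        · have hidx := PySem.List.index?_append_singleton_self p s h
          rw [PySem.List.index?_eq_idxOf?] at hidx
          simp [hidx]

-- ===== VERDICT (by name: the statement is the Claim_ definition above) =====
theorem get_new_colors_spec : Claim_equal_get_new_colors := by
  intro raw _
  show get_new_colors raw = get_new_colors_alt raw
  have hA : raw.foldl pvStepA (PySem.Dict.empty, 1, []) = pvState raw := by
    rw [← pvState_nil, pvLoopA]; simp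
  have hg : ∀ a ∈ PySem.List.dedup raw, ∀ b ∈ PySem.List.dedup raw,
      (((PySem.List.index? raw a).getD 0 : Nat) : Int)
        = (((PySem.List.index? raw b).getD 0 : Nat) : Int) → a = b := by
    intro a ha b hb hab
    obtain ⟨ja, hja⟩ := Option.isSome_iff_exists.1
      ((PySem.List.index?_isSome_iff _ _).2 ((PySem.List.mem_dedup _ _).1 ha))
    obtain ⟨jb, hjb⟩ := Option.isSome_iff_exists.1
      ((PySem.List.index?_isSome_iff _ _).2 ((PySem.List.mem_dedup _ _).1 hb))
    obtain ⟨hlta, hgeta, -⟩ := PySem.List.getElem_of_index?_eq_some hja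
    obtain ⟨hltb, hgetb, -⟩ := PySem.List.getElem_of_index?_eq_some hjb
    rw [hja, hjb] at hab
    simp at hab
    subst hab
    rw [← hgeta, ← hgetb]
  have hlist : ∀ t ∈ raw, (pvTableB raw).getD t 0
      = (((PySem.List.index? (pvFirsts raw)
          (((PySem.List.index? raw t).getD 0 : Nat) : Int)).getD 0 : Nat) : Int) + 1 := by
    intro t ht
    have h2 := pvIndex?_map_inj
      (fun s => (((PySem.List.index? raw s).getD 0 : Nat) : Int))
      (PySem.List.dedup raw) t ((PySem.List.mem_dedup _ _).2 ht) hg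
    rw [pvGetD_tableB raw t ht, pvFirsts_eq]
    simp only [] at h2
    rw [h2]

  have hdict : ((PySem.List.enumerate (pvFirsts raw) 0).foldl
      (fun d q => d.insert (PySem.List.pyGetD raw q.2 []) (q.1 + 1)) PySem.Dict.empty)
      = pvTableB raw := by
    rw [pvFirsts_eq, pvEnumerate_map, List.foldl_map]
    unfold pvTableB
    apply PySem.List.foldl_congr_mem
    intro d q hq
    obtain ⟨k, hk, rfl⟩ := (PySem.List.mem_enumerate_iff _ _ _).1 hq
    have htmem : (PySem.List.dedup raw)[k] ∈ raw :=
      (PySem.List.mem_dedup _ _).1 (List.getElem_mem hk)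
    obtain ⟨j, hj⟩ := Option.isSome_iff_exists.1
      ((PySem.List.index?_isSome_iff _ _).2 htmem)
    obtain ⟨hjlt, hjget, -⟩ := PySem.List.getElem_of_index?_eq_some hj
    simp only [hj, Option.getD_some]
    rw [PySem.List.pyGetD_natCast, List.getD_eq_getElem raw [] hjlt, hjget]
  have h1 : raw.map (fun s => (pvTableB raw).getD s 0)
      = raw.map (fun t => (((PySem.List.index? (pvFirsts raw)
          (((PySem.List.index? raw t).getD 0 : Nat) : Int)).getD 0 : Nat) : Int) + 1) :=
    List.map_congr_left (fun t ht => hlist t ht)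
  have h3 : ((PySem.List.dedup raw).length : Int) + 1 - 1 = ((pvFirsts raw).length : Int) := by
    rw [pvFirsts_eq]; simp
  simp only [get_new_colors, get_new_colors_alt, hA, pvState, hdict, h1, h3]
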